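-- pv_equiv track=rewrite | github.com/Shivam-baghel/Python_Scaler | 2. Data Structures and Algorithm/2. Advance/02. Arrays - 2/Homework/2. Max Square Sum submatrix.py | solve
-- ===== SOURCE A (Python) =====
-- def solve( A, B):
--     pfList = []                 #Empty Prefix Array
--
--     n = len(A)                  #Rows
--     m = len(A[0])               #columns
--
--     #Creating 0 matrix
--     for i in range(n):
--         pfList.append([0]*m)
--
--     pfList[0][0] = A[0][0]      #First Element will remain same
--
--
--     #Sum rowwise in the matrix
--     for i in range(1,m):
--         pfList[0][i] = A[0][i] + pfList[0][i-1]
--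
--     #Sum column wise in the matrix
--     for i in range(1,n):
--         pfList[i][0] = pfList[i-1][0] + A[i][0]
--
--     #Full Prefix array creating
--     for i in range(1,n):
--         for j in range(1,m):
--             pfList[i][j] = A[i][j] + pfList[i-1][j] + pfList[i][j-1] - pfList[i-1][j-1]
--
--     ans = -1000000
--     curSum = 0
--     for c in range(B-1,n):
--         for d in range(B-1,m):
--             a,b = c-(B-1), d-(B-1)      # a,b = Top Left corners and c,d = Button righ corners
--             if a == 0 and b == 0:
--                 curSum = pfList[c][d]
--             elif a == 0 and b != 0:
--                 curSum = pfList[c][d] - pfList[c][b-1]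
--             elif b == 0 and a != 0:
--                 curSum = pfList[c][d] - pfList[a-1][d]
--             else:
--                 curSum = pfList[c][d] - pfList[c][b-1] - pfList[a-1][d] + pfList[a-1][b-1]
--             ans = max(ans,curSum)
--     return ans
-- ===== SOURCE B (Python) =====
-- def solve(A, B):
--     n = len(A)
--     m = len(A[0])
--     ans = -1000000
--     for c in range(B - 1, n):
--         for d in range(B - 1, m):
--             cur = 0
--             for i in range(c - B + 1, c + 1):
--                 row = A[i]
--                 for j in range(d - B + 1, d + 1):
--                     cur += row[j]
--             ans = max(ans, cur)
--     return ans
-- ===== Notes on version B (the rewrite author's own statement) =====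
-- stated objective: simpler
-- what changed: B drops A's 2D prefix-sum table and its four-way corner case analysis entirely and sums each BxB window directly with two inner loops, skipping the O(n*m) table allocation and fill.
-- outside the precondition, e.g. on solve([[1, 2], [3, 4]], 0): A returns 10, B returns 0
import Mathlib
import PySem

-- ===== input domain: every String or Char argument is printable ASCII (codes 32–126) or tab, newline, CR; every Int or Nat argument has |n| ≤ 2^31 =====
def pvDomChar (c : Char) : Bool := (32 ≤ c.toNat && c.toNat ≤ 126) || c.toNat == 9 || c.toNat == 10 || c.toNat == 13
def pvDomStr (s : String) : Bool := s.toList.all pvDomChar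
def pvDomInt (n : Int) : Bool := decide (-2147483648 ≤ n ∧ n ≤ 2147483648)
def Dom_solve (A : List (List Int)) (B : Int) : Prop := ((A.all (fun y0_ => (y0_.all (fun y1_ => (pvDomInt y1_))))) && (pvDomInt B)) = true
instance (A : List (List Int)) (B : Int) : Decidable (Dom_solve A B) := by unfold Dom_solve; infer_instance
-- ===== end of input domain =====

-- B replaces A's 2D prefix-sum table and its four-way corner case analysis by directly summing
-- each B×B window (objective: simpler; not faster); the ports agree on all inputs admitted by Pre_solve.

-- ===== PORT A =====
-- pfList[i][j] read / write (Python indexing; every access is in range under Pre_solve)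
def pvGet2 (pf : List (List Int)) (i j : Int) : Int :=
  PySem.List.pyGetD (PySem.List.pyGetD pf i []) j 0

def pvSet2 (pf : List (List Int)) (i j : Int) (v : Int) : List (List Int) :=
  PySem.List.pySetD pf i (PySem.List.pySetD (PySem.List.pyGetD pf i []) j v)

-- construction of A's prefix-sum table pfList (the four table-filling loops of A, verbatim)
def pvPrefix (Amat : List (List Int)) : List (List Int) :=
  let n : Int := Amat.length
  let m : Int := (PySem.List.pyGetD Amat 0 []).length
  let pf0 : List (List Int) :=
    (PySem.List.pyRange 0 n 1).foldl (fun pf _ => pf ++ [List.replicate m.toNat 0]) []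
  let pf1 := pvSet2 pf0 0 0 (pvGet2 Amat 0 0)
  let pf2 := (PySem.List.pyRange 1 m 1).foldl
    (fun pf i => pvSet2 pf 0 i (pvGet2 Amat 0 i + pvGet2 pf 0 (i - 1))) pf1
  let pf3 := (PySem.List.pyRange 1 n 1).foldl
    (fun pf i => pvSet2 pf i 0 (pvGet2 pf (i - 1) 0 + pvGet2 Amat i 0)) pf2
  (PySem.List.pyRange 1 n 1).foldl
    (fun pf i => (PySem.List.pyRange 1 m 1).foldl
      (fun pf j => pvSet2 pf i j
        (pvGet2 Amat i j + pvGet2 pf (i - 1) j + pvGet2 pf i (j - 1)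
          - pvGet2 pf (i - 1) (j - 1))) pf) pf3

def solve (A : List (List Int)) (B : Int) : Int :=
  let n : Int := A.length
  let m : Int := (PySem.List.pyGetD A 0 []).length
  let pf4 := pvPrefix A
  (PySem.List.pyRange (B - 1) n 1).foldl (fun ans c =>
    (PySem.List.pyRange (B - 1) m 1).foldl (fun ans d =>
      let a := c - (B - 1)
      let b := d - (B - 1)
      let curSum :=
        if a = 0 ∧ b = 0 then pvGet2 pf4 c d
        else if a = 0 ∧ b ≠ 0 then pvGet2 pf4 c d - pvGet2 pf4 c (b - 1)
        else if b = 0 ∧ a ≠ 0 then pvGet2 pf4 c d - pvGet2 pf4 (a - 1) d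
        else pvGet2 pf4 c d - pvGet2 pf4 c (b - 1) - pvGet2 pf4 (a - 1) d
          + pvGet2 pf4 (a - 1) (b - 1)
      max ans curSum) ans) (-1000000)

-- ===== PORT B =====
def solve_alt (A : List (List Int)) (B : Int) : Int :=
  let n : Int := A.length
  let m : Int := (PySem.List.pyGetD A 0 []).length
  (PySem.List.pyRange (B - 1) n 1).foldl (fun ans c =>
    (PySem.List.pyRange (B - 1) m 1).foldl (fun ans d =>
      let cur := (PySem.List.pyRange (c - B + 1) (c + 1) 1).foldl (fun s i =>
        let row := PySem.List.pyGetD A i []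
        (PySem.List.pyRange (d - B + 1) (d + 1) 1).foldl
          (fun s j => s + PySem.List.pyGetD row j 0) s) 0
      max ans cur) ans) (-1000000)

-- ===== PRECONDITION & SPEC =====
-- Pre_solve excludes the inputs where the Python A raises IndexError (empty matrix, empty first
-- row, a row shorter than the first row) and B ≤ 0, which lies outside the task's natural domain:
-- there A's returned value (when it returns at all) arises from Python negative-index wraparound.
def Pre_solve (A : List (List Int)) (B : Int) : Prop :=
  A ≠ [] ∧ 0 < (A.headD []).length ∧ (∀ row ∈ A, (A.headD []).length ≤ row.length) ∧ 1 ≤ B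

instance (A : List (List Int)) (B : Int) : Decidable (Pre_solve A B) := by
  unfold Pre_solve; infer_instance

def pvWitness_solve : List (List Int) × Int := ([[1, 2], [3, 4]], 2)

def Spec_solve (A : List (List Int)) (B : Int) (out : Int) : Prop := out = solve_alt A B
instance (A : List (List Int)) (B : Int) (out : Int) : Decidable (Spec_solve A B out) := by
  unfold Spec_solve; infer_instance

-- ===== CLAIM (what is proved, stated in full; the proofs are below) =====
def Claim_equal_solve : Prop :=
  ∀ (A : List (List Int)) (B : Int), Dom_solve A B → Pre_solve A B → Spec_solve A B (solve A B)

-- ===== LEMMAS AND PROOFS =====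

-- entry (i,j) with defaults, Nat indices
def pvE (pf : List (List Int)) (i j : Nat) : Int := (pf.getD i []).getD j 0

-- 2D prefix sum of the input matrix
def pvS (A : List (List Int)) (i j : Nat) : Int :=
  ∑ p ∈ Finset.range (i + 1), ∑ q ∈ Finset.range (j + 1), pvE A p q

def pvM (A : List (List Int)) : Nat := (A.getD 0 []).length

def pvShape (A pf : List (List Int)) : Prop :=
  pf.length = A.length ∧ ∀ r ∈ pf, r.length = pvM A

lemma pvGet2_natCast (pf : List (List Int)) (i j : Nat) :
    pvGet2 pf (i : Int) (j : Int) = pvE pf i j := by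
  simp [pvGet2, pvE]

lemma pv_getD_mem (l : List (List Int)) (i : Nat) (h : i < l.length) : l.getD i [] ∈ l := by
  rw [List.getD_eq_getElem l [] h]; exact List.getElem_mem h

lemma pvE_set2 (pf : List (List Int)) (i j : Nat) (v : Int)
    (hi : i < pf.length) (hj : j < (pf.getD i []).length) (p q : Nat) :
    pvE (pvSet2 pf (i : Int) (j : Int) v) p q = if p = i ∧ q = j then v else pvE pf p q := by
  rw [List.getD_eq_getElem?_getD] at hj
  simp only [pvSet2, PySem.List.pySetD_natCast, PySem.List.pyGetD_natCast, pvE,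
    List.getD_eq_getElem?_getD, List.getElem?_set]
  rcases eq_or_ne p i with rfl | hp
  · simp only [if_pos hi]
    rcases eq_or_ne q j with rfl | hq
    · simp [hj]
    · simp [hq, Ne.symm hq]
  · simp [Ne.symm hp, hp]

lemma pvShape_set2 (A pf : List (List Int)) (i j : Nat) (v : Int) (h : pvShape A pf) :
    pvShape A (pvSet2 pf (i : Int) (j : Int) v) := by
  obtain ⟨h1, h2⟩ := h
  simp only [pvSet2, PySem.List.pySetD_natCast, PySem.List.pyGetD_natCast, pvShape]
  rcases Nat.lt_or_ge i pf.length with hi | hi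
  · refine ⟨by simpa using h1, ?_⟩
    intro r hr
    rcases List.mem_or_eq_of_mem_set hr with hr | rfl
    · exact h2 r hr
    · simpa using h2 _ (pv_getD_mem pf i hi)
  · rw [List.set_eq_of_length_le hi]
    exact ⟨h1, h2⟩

lemma pvFoldInv {σ : Type} (f : σ → Int → σ) (P : Nat → σ → Prop) (lo : Nat) (s : σ)
    (hi : Nat) (hlo : lo ≤ hi)
    (hstep : ∀ (u : Nat) (t : σ), lo ≤ u → u < hi → P u t → P (u + 1) (f t (u : Int)))
    (hbase : P lo s) :
    P hi ((PySem.List.pyRange (lo : Int) (hi : Int) 1).foldl f s) := by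
  induction hi, hlo using Nat.le_induction with
  | base =>
      rw [PySem.List.pyRange_one_eq_nil (le_refl _)]
      exact hbase
  | succ n hn ih =>
      have h1 : ((n + 1 : Nat) : Int) = (n : Int) + 1 := by push_cast; ring
      rw [h1, PySem.List.pyRange_one_succ_right (by exact_mod_cast hn), List.foldl_append]
      simp only [List.foldl_cons, List.foldl_nil]
      exact hstep n _ hn (Nat.lt_succ_self n)
        (ih (fun u t hu hun => hstep u t hu (Nat.lt_succ_of_lt hun)))

lemma pvSumRange (n : Nat) (f : Nat → Int) :
    ((List.range n).map f).sum = ∑ k ∈ Finset.range n, f k := by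
  induction n with
  | zero => simp
  | succ n ih =>
      rw [List.range_succ, Finset.sum_range_succ, List.map_append, List.sum_append, ih]
      simp

lemma pvFoldSum (lo hi : Nat) (g : Int → Int) (init : Int) :
    (PySem.List.pyRange (lo : Int) (hi : Int) 1).foldl (fun s i => s + g i) init
      = init + ∑ k ∈ Finset.Ico lo hi, g (k : Int) := by
  rw [PySem.List.foldl_add, PySem.List.pyRange_one, List.map_map, pvSumRange]
  have h : (((hi : Int)) - ((lo : Int))).toNat = hi - lo := by omega
  rw [h, Finset.sum_Ico_eq_sum_range]
  apply congrArg
  apply Finset.sum_congr rfl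
  intro k _
  simp only [Function.comp]
  congr 1

lemma pvS_zero (A : List (List Int)) : pvS A 0 0 = pvE A 0 0 := by
  simp [pvS]

lemma pvS_row (A : List (List Int)) (j : Nat) :
    pvS A 0 (j + 1) = pvE A 0 (j + 1) + pvS A 0 j := by
  simp [pvS, Finset.sum_range_succ]
  ring

lemma pvS_col (A : List (List Int)) (i : Nat) :
    pvS A (i + 1) 0 = pvS A i 0 + pvE A (i + 1) 0 := by
  simp [pvS, Finset.sum_range_succ]

lemma pvS_rec (A : List (List Int)) (i j : Nat) :
    pvS A (i + 1) (j + 1)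
      = pvE A (i + 1) (j + 1) + pvS A i (j + 1) + pvS A (i + 1) j - pvS A i j := by
  simp [pvS, Finset.sum_range_succ, Finset.sum_add_distrib]
  ring

lemma pvPf0 (n : Int) (_hn : 0 ≤ n) (r : List Int) :
    (PySem.List.pyRange 0 n 1).foldl (fun (pf : List (List Int)) _ => pf ++ [r]) []
      = List.replicate n.toNat r := by
  rw [show (fun (pf : List (List Int)) (_ : Int) => pf ++ [r])
        = fun (pf : List (List Int)) (x : Int) => pf ++ [(fun _ => r) x] from rfl,
      PySem.List.foldl_append_singleton_eq_map]
  rw [List.map_const']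
  rw [PySem.List.length_pyRange_one]
  simp

lemma pvE_replicate (n m i j : Nat) :
    pvE (List.replicate n (List.replicate m (0 : Int))) i j = 0 := by
  simp only [pvE, List.getD_eq_getElem?_getD, List.getElem?_replicate]
  rcases Nat.lt_or_ge i n with h | h
  · simp only [if_pos h, Option.getD_some, List.getElem?_replicate]
    split <;> simp
  · simp [Nat.not_lt.mpr h]

lemma pvShape_replicate (A : List (List Int)) :
    pvShape A (List.replicate A.length (List.replicate (pvM A) (0 : Int))) := by
  refine ⟨by simp, ?_⟩
  intro r hr
  rw [List.eq_of_mem_replicate hr]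
  simp

lemma pvGet2_zl (pf : List (List Int)) (j : Nat) : pvGet2 pf 0 (j : Int) = pvE pf 0 j := by
  have h := pvGet2_natCast pf 0 j
  push_cast at h
  exact h

lemma pvGet2_zr (pf : List (List Int)) (i : Nat) : pvGet2 pf (i : Int) 0 = pvE pf i 0 := by
  have h := pvGet2_natCast pf i 0
  push_cast at h
  exact h

lemma pvGet2_zz (pf : List (List Int)) : pvGet2 pf 0 0 = pvE pf 0 0 := by
  have h := pvGet2_natCast pf 0 0
  push_cast at h
  exact h

lemma pvSet2_zl (pf : List (List Int)) (j : Nat) (v : Int) :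
    pvSet2 pf 0 (j : Int) v = pvSet2 pf ((0 : Nat) : Int) (j : Int) v := by norm_num

lemma pvPhase2 (A pf1 : List (List Int)) (hn : 0 < A.length) (hm : 0 < pvM A)
    (hsh : pvShape A pf1)
    (hE : ∀ p q, pvE pf1 p q = if p = 0 ∧ q = 0 then pvS A 0 0 else 0) :
    pvShape A ((PySem.List.pyRange 1 ((pvM A : Nat) : Int) 1).foldl
      (fun pf i => pvSet2 pf 0 i (pvGet2 A 0 i + pvGet2 pf 0 (i - 1))) pf1) ∧
    ∀ p q, pvE ((PySem.List.pyRange 1 ((pvM A : Nat) : Int) 1).foldl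
      (fun pf i => pvSet2 pf 0 i (pvGet2 A 0 i + pvGet2 pf 0 (i - 1))) pf1) p q
      = if p = 0 ∧ q < pvM A then pvS A 0 q else 0 := by
  have main := pvFoldInv (fun pf i => pvSet2 pf 0 i (pvGet2 A 0 i + pvGet2 pf 0 (i - 1)))
    (fun u pf => pvShape A pf ∧ ∀ p q, pvE pf p q = if p = 0 ∧ q < u then pvS A 0 q else 0)
    1 pf1 (pvM A) hm ?_ ?_
  · rw [Nat.cast_one] at main
    exact main
  · rintro u t hu hult ⟨tsh, tE⟩
    dsimp only
    have hlen : 0 < t.length := by rw [tsh.1]; exact hn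
    have hrow : u < (t.getD 0 []).length := by
      rw [tsh.2 _ (pv_getD_mem t 0 hlen)]; exact hult
    have hc1 : ((u : Int)) - 1 = (((u - 1 : Nat)) : Int) := by omega
    have hval : pvGet2 A 0 (u : Int) + pvGet2 t 0 ((u : Int) - 1) = pvS A 0 u := by
      rw [hc1, pvGet2_zl, pvGet2_zl, tE]
      rw [if_pos ⟨rfl, by omega⟩]
      have hu' : u - 1 + 1 = u := by omega
      have hr := pvS_row A (u - 1)
      rw [hu'] at hr
      linarith
    have hset := pvE_set2 t 0 u (pvGet2 A 0 (u : Int) + pvGet2 t 0 ((u : Int) - 1)) hlen hrow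
    push_cast at hset
    constructor
    · rw [pvSet2_zl]
      exact pvShape_set2 A t 0 u _ tsh
    · intro p q
      rw [hset p q, hval, tE p q]
      by_cases hp : p = 0
      · by_cases hq : q = u
        · have h1 : u < u + 1 := by omega
          simp [hp, hq, h1]
        · have h2 : (q < u + 1) ↔ q < u := by omega
          simp [hq, h2]
      · simp [hp]
  · refine ⟨hsh, ?_⟩
    intro p q
    rw [hE p q]
    by_cases hp : p = 0
    · by_cases hq : q = 0
      · have h1 : (0:Nat) < 1 := by omega
        simp [hp, hq, h1]
      · have h2 : ¬ (q < 1) := by omega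
        simp [hq, h2]
    · simp [hp]

lemma pvPhase3 (A pf2 : List (List Int)) (hn : 0 < A.length) (hm : 0 < pvM A)
    (hsh : pvShape A pf2)
    (hE : ∀ p q, pvE pf2 p q = if p = 0 ∧ q < pvM A then pvS A 0 q else 0) :
    pvShape A ((PySem.List.pyRange 1 ((A.length : Nat) : Int) 1).foldl
      (fun pf i => pvSet2 pf i 0 (pvGet2 pf (i - 1) 0 + pvGet2 A i 0)) pf2) ∧
    ∀ p q, pvE ((PySem.List.pyRange 1 ((A.length : Nat) : Int) 1).foldl
      (fun pf i => pvSet2 pf i 0 (pvGet2 pf (i - 1) 0 + pvGet2 A i 0)) pf2) p q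
      = if p = 0 ∧ q < pvM A then pvS A 0 q
        else if q = 0 ∧ p < A.length then pvS A p 0 else 0 := by
  have main := pvFoldInv (fun pf i => pvSet2 pf i 0 (pvGet2 pf (i - 1) 0 + pvGet2 A i 0))
    (fun u pf => pvShape A pf ∧ ∀ p q, pvE pf p q =
      if p = 0 ∧ q < pvM A then pvS A 0 q
      else if q = 0 ∧ p < u then pvS A p 0 else 0)
    1 pf2 A.length hn ?_ ?_
  · rw [Nat.cast_one] at main
    exact main
  · rintro u t hu hult ⟨tsh, tE⟩
    dsimp only
    have hlen : u < t.length := by rw [tsh.1]; exact hult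
    have hrow : 0 < (t.getD u []).length := by
      rw [tsh.2 _ (pv_getD_mem t u hlen)]; exact hm
    have hc1 : ((u : Int)) - 1 = (((u - 1 : Nat)) : Int) := by omega
    have hval : pvGet2 t ((u : Int) - 1) 0 + pvGet2 A (u : Int) 0 = pvS A u 0 := by
      rw [hc1, pvGet2_zr, pvGet2_zr, tE]
      have hu' : u - 1 + 1 = u := by omega
      have hr := pvS_col A (u - 1)
      rw [hu'] at hr
      by_cases h0 : u - 1 = 0
      · rw [if_pos ⟨h0, hm⟩]
        rw [h0] at hr
        linarith
      · rw [if_neg (fun h => h0 h.1), if_pos ⟨rfl, by omega⟩]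
        linarith
    have hset := pvE_set2 t u 0 (pvGet2 t ((u : Int) - 1) 0 + pvGet2 A (u : Int) 0) hlen hrow
    push_cast at hset
    constructor
    · have hs := pvShape_set2 A t u 0 (pvGet2 t ((u : Int) - 1) 0 + pvGet2 A (u : Int) 0) tsh
      push_cast at hs
      exact hs
    · intro p q
      rw [hset p q, hval, tE p q]
      by_cases hpq : p = u ∧ q = 0
      · obtain ⟨hp, hq⟩ := hpq
        have h1 : ¬ (u = 0) := by omega
        have h2 : u < u + 1 := by omega
        simp [hp, hq, h1, h2]
      · by_cases hq : q = 0
        · have hp : ¬ (p = u) := fun h => hpq ⟨h, hq⟩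
          have h3 : (p < u + 1) ↔ p < u := by omega
          simp [hp, hq, hm, h3]
        · simp [hq]
  · refine ⟨hsh, ?_⟩
    intro p q
    rw [hE p q]
    by_cases hp : p = 0
    · by_cases hq : q < pvM A
      · simp [hp, hq]
      · have hq0 : ¬ (q = 0) := by omega
        simp [hp, hq, hq0]
    · have h1 : ¬ (p < 1) := by omega
      simp [hp, h1]

lemma pvPhase4Inner (A t : List (List Int)) (u : Nat) (hu : 1 ≤ u) (hun : u < A.length)
    (hm : 0 < pvM A) (tsh : pvShape A t)
    (tE : ∀ p q, pvE t p q = if p < u ∧ q < pvM A then pvS A p q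
      else if q = 0 ∧ p < A.length then pvS A p 0 else 0) :
    pvShape A ((PySem.List.pyRange 1 ((pvM A : Nat) : Int) 1).foldl
      (fun pf j => pvSet2 pf (u : Int) j
        (pvGet2 A (u : Int) j + pvGet2 pf ((u : Int) - 1) j + pvGet2 pf (u : Int) (j - 1)
          - pvGet2 pf ((u : Int) - 1) (j - 1))) t) ∧
    ∀ p q, pvE ((PySem.List.pyRange 1 ((pvM A : Nat) : Int) 1).foldl
      (fun pf j => pvSet2 pf (u : Int) j
        (pvGet2 A (u : Int) j + pvGet2 pf ((u : Int) - 1) j + pvGet2 pf (u : Int) (j - 1)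
          - pvGet2 pf ((u : Int) - 1) (j - 1))) t) p q
      = if p < u + 1 ∧ q < pvM A then pvS A p q
        else if q = 0 ∧ p < A.length then pvS A p 0 else 0 := by
  have main := pvFoldInv
    (fun pf j => pvSet2 pf (u : Int) j
      (pvGet2 A (u : Int) j + pvGet2 pf ((u : Int) - 1) j + pvGet2 pf (u : Int) (j - 1)
        - pvGet2 pf ((u : Int) - 1) (j - 1)))
    (fun v pf => pvShape A pf ∧ ∀ p q, pvE pf p q =
      if p < u ∧ q < pvM A then pvS A p q
      else if p = u ∧ q < v then pvS A u q
      else if q = 0 ∧ p < A.length then pvS A p 0 else 0)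
    1 t (pvM A) hm ?_ ?_
  · rw [Nat.cast_one] at main
    refine ⟨main.1, ?_⟩
    intro p q
    rw [main.2 p q]
    by_cases hpu : p = u
    · by_cases hq : q < pvM A
      · have h1 : ¬ (p < u) := by omega
        have h2 : p < u + 1 := by omega
        simp [hpu, hq]
      · have h1 : ¬ (q = 0) := by omega
        simp [hq, h1]
    · have h3 : (p < u + 1) ↔ p < u := by omega
      simp [hpu, h3]
  · rintro v t' hv hvm ⟨tsh', tE'⟩
    dsimp only
    have hlen : u < t'.length := by rw [tsh'.1]; exact hun
    have hrow : v < (t'.getD u []).length := by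
      rw [tsh'.2 _ (pv_getD_mem t' u hlen)]; exact hvm
    have hcu : ((u : Int)) - 1 = (((u - 1 : Nat)) : Int) := by omega
    have hcv : ((v : Int)) - 1 = (((v - 1 : Nat)) : Int) := by omega
    have hval : pvGet2 A (u : Int) (v : Int) + pvGet2 t' ((u : Int) - 1) (v : Int)
        + pvGet2 t' (u : Int) ((v : Int) - 1) - pvGet2 t' ((u : Int) - 1) ((v : Int) - 1)
        = pvS A u v := by
      rw [hcu, hcv, pvGet2_natCast, pvGet2_natCast, pvGet2_natCast, pvGet2_natCast,
        tE' (u - 1) v, tE' u (v - 1), tE' (u - 1) (v - 1)]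
      rw [if_pos ⟨by omega, hvm⟩]
      rw [if_neg (fun h => by omega), if_pos ⟨rfl, by omega⟩]
      rw [if_pos ⟨by omega, by omega⟩]
      have hu' : u - 1 + 1 = u := by omega
      have hv' : v - 1 + 1 = v := by omega
      have hr := pvS_rec A (u - 1) (v - 1)
      rw [hu', hv'] at hr
      linarith
    have hset := pvE_set2 t' u v
      (pvGet2 A (u : Int) (v : Int) + pvGet2 t' ((u : Int) - 1) (v : Int)
        + pvGet2 t' (u : Int) ((v : Int) - 1) - pvGet2 t' ((u : Int) - 1) ((v : Int) - 1))
      hlen hrow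
    constructor
    · exact pvShape_set2 A t' u v _ tsh'
    · intro p q
      rw [hset p q, hval, tE' p q]
      by_cases hpq : p = u ∧ q = v
      · obtain ⟨hp, hq⟩ := hpq
        have h1 : ¬ (u < u) := by omega
        have h2 : v < v + 1 := by omega
        simp [hp, hq, h2, hvm]
      · by_cases hp : p = u
        · have hq : ¬ (q = v) := fun h => hpq ⟨hp, h⟩
          have h3 : (q < v + 1) ↔ q < v := by omega
          have h1 : ¬ (p < u) := by omega
          simp [hp, hq, h3]
        · simp [hp]
  · refine ⟨tsh, ?_⟩
    intro p q
    rw [tE p q]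
    by_cases hp : p = u
    · by_cases hq : q = 0
      · have h1 : ¬ (p < u) := by omega
        have h2 : q < 1 := by omega
        simp [hp, hq, hun]
      · have h2 : ¬ (q < 1) := by omega
        have h1 : ¬ (p < u) := by omega
        simp [hp, hq, h2]
    · have h3 : ¬ (p = u) := hp
      simp [h3]

lemma pvPhase4 (A pf3 : List (List Int)) (hn : 0 < A.length) (hm : 0 < pvM A)
    (hsh : pvShape A pf3)
    (hE : ∀ p q, pvE pf3 p q = if p = 0 ∧ q < pvM A then pvS A 0 q
      else if q = 0 ∧ p < A.length then pvS A p 0 else 0) :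
    ∀ p q, p < A.length → q < pvM A →
      pvE ((PySem.List.pyRange 1 ((A.length : Nat) : Int) 1).foldl
        (fun pf i => (PySem.List.pyRange 1 ((pvM A : Nat) : Int) 1).foldl
          (fun pf j => pvSet2 pf i j
            (pvGet2 A i j + pvGet2 pf (i - 1) j + pvGet2 pf i (j - 1)
              - pvGet2 pf (i - 1) (j - 1))) pf) pf3) p q = pvS A p q := by
  have main := pvFoldInv
    (fun pf i => (PySem.List.pyRange 1 ((pvM A : Nat) : Int) 1).foldl
      (fun pf j => pvSet2 pf i j
        (pvGet2 A i j + pvGet2 pf (i - 1) j + pvGet2 pf i (j - 1)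
          - pvGet2 pf (i - 1) (j - 1))) pf)
    (fun u pf => pvShape A pf ∧ ∀ p q, pvE pf p q =
      if p < u ∧ q < pvM A then pvS A p q
      else if q = 0 ∧ p < A.length then pvS A p 0 else 0)
    1 pf3 A.length hn ?_ ?_
  · rw [Nat.cast_one] at main
    intro p q hp hq
    rw [main.2 p q, if_pos ⟨hp, hq⟩]
  · rintro u t hu hult ⟨tsh, tE⟩
    dsimp only
    exact pvPhase4Inner A t u hu hult hm tsh tE
  · refine ⟨hsh, ?_⟩
    intro p q
    rw [hE p q]
    by_cases hp : p = 0
    · by_cases hq : q < pvM A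
      · have h1 : p < 1 := by omega
        simp [hp, hq]
      · have h2 : ¬ (q = 0) := by omega
        simp [hq, h2, hp]
    · have h1 : ¬ (p < 1) := by omega
      simp [hp, h1]

lemma pvPrefix_spec (A : List (List Int)) (hn : 0 < A.length) (hm : 0 < pvM A) :
    ∀ p q, p < A.length → q < pvM A → pvE (pvPrefix A) p q = pvS A p q := by
  have hMdef : ((PySem.List.pyGetD A 0 []).length : Int) = ((pvM A : Nat) : Int) := by
    rw [PySem.List.pyGetD_zero]; rfl
  simp only [pvPrefix]
  rw [hMdef, Int.toNat_natCast]
  have h0 := pvPf0 (A.length : Int) (Int.natCast_nonneg _) (List.replicate (pvM A) 0)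
  rw [Int.toNat_natCast] at h0
  rw [h0]
  set R := List.replicate A.length (List.replicate (pvM A) (0:Int)) with hR
  have hsh0 : pvShape A R := pvShape_replicate A
  have hlen0 : 0 < R.length := by rw [hR]; simpa using hn
  have hrow0 : 0 < (R.getD 0 []).length := by
    have hgd : R.getD 0 [] = List.replicate (pvM A) 0 := by
      rw [hR]
      simp [List.getD_eq_getElem?_getD, hn]
    rw [hgd]
    simpa using hm
  have hset1 := pvE_set2 R 0 0 (pvGet2 A 0 0) hlen0 hrow0
  push_cast at hset1
  have hE1 : ∀ p q, pvE (pvSet2 R 0 0 (pvGet2 A 0 0)) p q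
      = if p = 0 ∧ q = 0 then pvS A 0 0 else 0 := by
    intro p q
    rw [hset1 p q, pvGet2_zz, ← pvS_zero]
    by_cases h : p = 0 ∧ q = 0
    · rw [if_pos h, if_pos h]
    · rw [if_neg h, if_neg h, hR, pvE_replicate]
  have hsh1 : pvShape A (pvSet2 R 0 0 (pvGet2 A 0 0)) := by
    have hs := pvShape_set2 A R 0 0 (pvGet2 A 0 0) hsh0
    push_cast at hs
    exact hs
  have P2 := pvPhase2 A _ hn hm hsh1 hE1
  have P3 := pvPhase3 A _ hn hm P2.1 P2.2
  exact pvPhase4 A _ hn hm P3.1 P3.2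

lemma pvBlock (A : List (List Int)) (aN bN cN dN : Nat) (ha : aN ≤ cN) (hb : bN ≤ dN) :
    ∑ i ∈ Finset.Ico aN (cN + 1), ∑ j ∈ Finset.Ico bN (dN + 1), pvE A i j
      = pvS A cN dN
        - (if bN = 0 then 0 else pvS A cN (bN - 1))
        - (if aN = 0 then 0 else pvS A (aN - 1) dN)
        + (if aN = 0 ∨ bN = 0 then 0 else pvS A (aN - 1) (bN - 1)) := by
  have hS : ∀ x y : Nat, ∑ i ∈ Finset.range (x + 1), ∑ j ∈ Finset.range (y + 1), pvE A i j
      = pvS A x y := fun _ _ => rfl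
  have e1' : (∑ i ∈ Finset.Ico aN (cN + 1), ∑ j ∈ Finset.Ico bN (dN + 1), pvE A i j)
      = ∑ i ∈ Finset.Ico aN (cN + 1),
          ((∑ j ∈ Finset.range (dN + 1), pvE A i j) - ∑ j ∈ Finset.range bN, pvE A i j) :=
    Finset.sum_congr rfl (fun i _ => Finset.sum_Ico_eq_sub _ (by omega))
  rw [e1', Finset.sum_sub_distrib,
    Finset.sum_Ico_eq_sub _ (by omega : aN ≤ cN + 1),
    Finset.sum_Ico_eq_sub _ (by omega : aN ≤ cN + 1)]
  have hr1 : ∑ i ∈ Finset.range aN, ∑ j ∈ Finset.range (dN + 1), pvE A i j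
      = (if aN = 0 then 0 else pvS A (aN - 1) dN) := by
    by_cases h : aN = 0
    · simp [h]
    · rw [if_neg h, ← hS (aN - 1) dN, show aN - 1 + 1 = aN from by omega]
  have hr2 : ∑ i ∈ Finset.range (cN + 1), ∑ j ∈ Finset.range bN, pvE A i j
      = (if bN = 0 then 0 else pvS A cN (bN - 1)) := by
    by_cases h : bN = 0
    · simp [h]
    · rw [if_neg h, ← hS cN (bN - 1), show bN - 1 + 1 = bN from by omega]
  have hr3 : ∑ i ∈ Finset.range aN, ∑ j ∈ Finset.range bN, pvE A i j
      = (if aN = 0 ∨ bN = 0 then 0 else pvS A (aN - 1) (bN - 1)) := by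
    by_cases h : aN = 0 ∨ bN = 0
    · rw [if_pos h]
      rcases h with h | h <;> simp [h]
    · rw [not_or] at h
      rw [if_neg (by tauto), ← hS (aN - 1) (bN - 1),
        show aN - 1 + 1 = aN from by omega, show bN - 1 + 1 = bN from by omega]
  rw [hr1, hr2, hr3, hS cN dN]
  ring


lemma pvCurEq (A : List (List Int)) (B c d : Int) (hn : 0 < A.length) (hm : 0 < pvM A)
    (hB : 1 ≤ B) (hc1 : B - 1 ≤ c) (hc2 : c < (A.length : Int))
    (hd1 : B - 1 ≤ d) (hd2 : d < ((pvM A : Nat) : Int)) :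
    (if c - (B - 1) = 0 ∧ d - (B - 1) = 0 then pvGet2 (pvPrefix A) c d
     else if c - (B - 1) = 0 ∧ d - (B - 1) ≠ 0 then
       pvGet2 (pvPrefix A) c d - pvGet2 (pvPrefix A) c (d - (B - 1) - 1)
     else if d - (B - 1) = 0 ∧ c - (B - 1) ≠ 0 then
       pvGet2 (pvPrefix A) c d - pvGet2 (pvPrefix A) (c - (B - 1) - 1) d
     else pvGet2 (pvPrefix A) c d - pvGet2 (pvPrefix A) c (d - (B - 1) - 1)
       - pvGet2 (pvPrefix A) (c - (B - 1) - 1) d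
       + pvGet2 (pvPrefix A) (c - (B - 1) - 1) (d - (B - 1) - 1))
    = (PySem.List.pyRange (c - B + 1) (c + 1) 1).foldl (fun s i =>
        (PySem.List.pyRange (d - B + 1) (d + 1) 1).foldl
          (fun s j => s + PySem.List.pyGetD (PySem.List.pyGetD A i []) j 0) s) 0 := by
  obtain ⟨cN, rfl⟩ : ∃ n : Nat, c = (n : Int) := ⟨c.toNat, by omega⟩
  obtain ⟨dN, rfl⟩ : ∃ n : Nat, d = (n : Int) := ⟨d.toNat, by omega⟩
  obtain ⟨BN, rfl⟩ : ∃ n : Nat, B = (n : Int) := ⟨B.toNat, by omega⟩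
  set aN := cN + 1 - BN with haN
  set bN := dN + 1 - BN with hbN
  have hBN : 1 ≤ BN := by exact_mod_cast hB
  have hcN : cN < A.length := by exact_mod_cast hc2
  have hdN : dN < pvM A := by exact_mod_cast hd2
  have hac : aN ≤ cN := by omega
  have hbd : bN ≤ dN := by omega
  have hca : ((cN : Int) - ((BN : Int) - 1)) = ((aN : Nat) : Int) := by omega
  have hcb : ((dN : Int) - ((BN : Int) - 1)) = ((bN : Nat) : Int) := by omega
  have hca1 : ((cN : Int) - (BN : Int) + 1) = ((aN : Nat) : Int) := by omega
  have hcb1 : ((dN : Int) - (BN : Int) + 1) = ((bN : Nat) : Int) := by omega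
  have hcp1 : ((cN : Int) + 1) = (((cN + 1 : Nat)) : Int) := by omega
  have hdp1 : ((dN : Int) + 1) = (((dN + 1 : Nat)) : Int) := by omega
  rw [hca1, hcb1, hcp1, hdp1]
  have hinner : ∀ (s i : Int),
      (PySem.List.pyRange ((bN : Nat) : Int) (((dN + 1 : Nat)) : Int) 1).foldl
        (fun s j => s + PySem.List.pyGetD (PySem.List.pyGetD A i []) j 0) s
        = s + ∑ k ∈ Finset.Ico bN (dN + 1),
            PySem.List.pyGetD (PySem.List.pyGetD A i []) ((k : Nat) : Int) 0 :=
    fun s i => pvFoldSum bN (dN + 1) _ s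
  have hRHS : (PySem.List.pyRange ((aN : Nat) : Int) (((cN + 1 : Nat)) : Int) 1).foldl
      (fun s i => (PySem.List.pyRange ((bN : Nat) : Int) (((dN + 1 : Nat)) : Int) 1).foldl
        (fun s j => s + PySem.List.pyGetD (PySem.List.pyGetD A i []) j 0) s) 0
      = ∑ i ∈ Finset.Ico aN (cN + 1), ∑ j ∈ Finset.Ico bN (dN + 1), pvE A i j := by
    have hfun : (fun (s i : Int) =>
        (PySem.List.pyRange ((bN : Nat) : Int) (((dN + 1 : Nat)) : Int) 1).foldl
          (fun s j => s + PySem.List.pyGetD (PySem.List.pyGetD A i []) j 0) s)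
        = fun (s i : Int) => s + ∑ k ∈ Finset.Ico bN (dN + 1),
            PySem.List.pyGetD (PySem.List.pyGetD A i []) ((k : Nat) : Int) 0 :=
      funext fun s => funext fun i => hinner s i
    rw [hfun, pvFoldSum aN (cN + 1) _ 0, zero_add]
    apply Finset.sum_congr rfl
    intro i _
    apply Finset.sum_congr rfl
    intro j _
    exact pvGet2_natCast A i j
  rw [hRHS, pvBlock A aN bN cN dN hac hbd, hca, hcb]
  have hget : ∀ p q : Nat, p < A.length → q < pvM A →
      pvGet2 (pvPrefix A) (p : Int) (q : Int) = pvS A p q := by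
    intro p q hp hq
    rw [pvGet2_natCast]
    exact pvPrefix_spec A hn hm p q hp hq
  simp only [ne_eq, Nat.cast_eq_zero]
  have hb1 : ((bN : Int) - 1) = (((bN - 1 : Nat)) : Int) ∨ bN = 0 := by omega
  have ha1 : ((aN : Int) - 1) = (((aN - 1 : Nat)) : Int) ∨ aN = 0 := by omega
  by_cases hA0 : aN = 0 <;> by_cases hB0 : bN = 0
  · rw [if_pos ⟨hA0, hB0⟩, hget cN dN hcN hdN]
    simp [hA0, hB0]
  · rw [if_neg (fun h => hB0 h.2), if_pos ⟨hA0, hB0⟩]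
    rcases hb1 with hb1 | hb1
    · rw [hb1, hget cN dN hcN hdN, hget cN (bN - 1) hcN (by omega)]
      simp [hA0, hB0]
    · exact absurd hb1 hB0
  · rw [if_neg (fun h => hA0 h.1), if_neg (fun h => hA0 h.1), if_pos ⟨hB0, hA0⟩]
    rcases ha1 with ha1 | ha1
    · rw [ha1, hget cN dN hcN hdN, hget (aN - 1) dN (by omega) hdN]
      simp [hA0, hB0]
    · exact absurd ha1 hA0
  · rw [if_neg (fun h => hA0 h.1), if_neg (fun h => hA0 h.1), if_neg (fun h => hB0 h.1)]
    rcases ha1 with ha1 | ha1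
    · rcases hb1 with hb1 | hb1
      · rw [ha1, hb1, hget cN dN hcN hdN, hget cN (bN - 1) hcN (by omega),
          hget (aN - 1) dN (by omega) hdN, hget (aN - 1) (bN - 1) (by omega) (by omega)]
        simp [hA0, hB0]
      · exact absurd hb1 hB0
    · exact absurd ha1 hA0


-- ===== VERDICT (by name: the statement is the Claim_ definition above) =====
theorem solve_spec : Claim_equal_solve := by
  intro A B _ hpre
  obtain ⟨hA, hm0, hrows, hB⟩ := hpre
  unfold Spec_solve
  have hn : 0 < A.length := by
    cases A with
    | nil => exact absurd rfl hA
    | cons a t => simp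
  have hm : 0 < pvM A := by
    cases A with
    | nil => exact absurd rfl hA
    | cons a t => simpa [pvM] using hm0
  have hMdef : (((PySem.List.pyGetD A 0 []).length : Nat) : Int) = ((pvM A : Nat) : Int) := by
    rw [PySem.List.pyGetD_zero]; rfl
  simp only [solve, solve_alt]
  rw [hMdef]
  apply PySem.List.foldl_congr_mem
  intro ans c hc
  rw [PySem.List.mem_pyRange_one] at hc
  apply PySem.List.foldl_congr_mem
  intro ans2 d hd
  rw [PySem.List.mem_pyRange_one] at hd
  congr 1
  exact pvCurEq A B c d hn hm hB hc.1 hc.2 hd.1 hd.2
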